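-- pv_equiv track=rewrite | github.com/INK-USC/MACROSCORE | lm_classify/other_code_utilities/RPP_longformer_new.py | encode_paper
-- ===== SOURCE A (Python) =====
-- def encode_paper(content):
--     sections = []
--     word_length = 0
--     for cont in content:
--         word_length += len(cont['text'].split())
--         if word_length > 2500:
--             break
--         sections.append(cont['text'])
--
--     section_text = " ".join(sections)
--     return section_text
-- ===== SOURCE B (Python) =====
-- def encode_paper(content):
--     # staged passes: extract texts, word counts, running cumulative totals,
--     # then take the prefix whose cumulative count stays <= 2500
--     texts = [c['text'] for c in content]
--     counts = [len(t.split()) for t in texts]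
--     cum = []
--     s = 0
--     for n in counts:
--         s += n
--         cum.append(s)
--     k = 0
--     while k < len(cum) and cum[k] <= 2500:
--         k += 1
--     return " ".join(texts[:k])
-- ===== Notes on version B (the rewrite author's own statement) =====
-- stated objective: alternative
-- what changed: Replaces the single imperative loop with break and a running total by staged passes: extract the texts, compute per-section word counts, build the list of cumulative sums, find the length of the prefix whose cumulative count stays <= 2500, and join that prefix of texts.
import Mathlib
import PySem

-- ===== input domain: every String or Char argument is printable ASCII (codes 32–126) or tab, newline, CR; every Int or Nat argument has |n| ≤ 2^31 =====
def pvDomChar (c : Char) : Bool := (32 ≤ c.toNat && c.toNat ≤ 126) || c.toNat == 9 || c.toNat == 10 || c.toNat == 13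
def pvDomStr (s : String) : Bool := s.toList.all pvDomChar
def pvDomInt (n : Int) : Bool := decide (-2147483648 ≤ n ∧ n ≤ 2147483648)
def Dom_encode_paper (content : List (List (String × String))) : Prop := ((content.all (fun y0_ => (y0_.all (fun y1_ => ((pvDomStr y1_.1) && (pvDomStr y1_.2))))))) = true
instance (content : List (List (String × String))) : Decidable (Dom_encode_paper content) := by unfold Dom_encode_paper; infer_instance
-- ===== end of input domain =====

-- B replaces A's single loop with break by staged passes (texts, counts, cumulative sums, prefix length); same cost.

-- ===== PORT A =====
-- loop of A: carries the accumulated sections and the running word_length, breaks on overflow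
def encodeGoA (l : List (List (String × String))) (sections : List String) (word_length : Int) : List String :=
  match l with
  | [] => sections
  | cont :: rest =>
      let t := ((PySem.Dict.mk cont).get? "text").getD ""   -- cont['text']; Pre_ guarantees the key is present
      let word_length' := word_length + ((PySem.Str.split₀ t).length : Int)
      if word_length' > 2500 then sections
      else encodeGoA rest (sections ++ [t]) word_length'

def encode_paper (content : List (List (String × String))) : String :=
  PySem.Str.join " " (encodeGoA content [] 0)

-- ===== PORT B =====
-- Source B's cumulative-sum pass: running total s, appending each partial sum
def cumB (counts : List Int) (s : Int) : List Int :=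
  match counts with
  | [] => []
  | n :: rest => (s + n) :: cumB rest (s + n)

-- Source B's while loop: length of the prefix of cum whose entries are <= 2500
def prefixLenB (cum : List Int) : Nat :=
  match cum with
  | [] => 0
  | c :: rest => if c ≤ 2500 then prefixLenB rest + 1 else 0

def encode_paper_alt (content : List (List (String × String))) : String :=
  let texts := content.map (fun cont => ((PySem.Dict.mk cont).get? "text").getD "")
  let counts := texts.map (fun t => ((PySem.Str.split₀ t).length : Int))
  PySem.Str.join " " (texts.take (prefixLenB (cumB counts 0)))

-- ===== PRECONDITION & SPEC =====
-- Pre_ excludes exactly the inputs where a section dict has no 'text' key: there A (and B) raise KeyError.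
def Pre_encode_paper (content : List (List (String × String))) : Prop :=
  ∀ cont ∈ content, ((PySem.Dict.mk cont).get? "text").isSome = true
instance (content : List (List (String × String))) : Decidable (Pre_encode_paper content) := by unfold Pre_encode_paper; infer_instance

def pvWitness_encode_paper : (List (List (String × String))) := [[("text", "hello world")], [("text", "more words here")]]

def Spec_encode_paper (content : List (List (String × String))) (out : String) : Prop := out = encode_paper_alt content
instance (content : List (List (String × String))) (out : String) : Decidable (Spec_encode_paper content out) := by unfold Spec_encode_paper; infer_instance

-- ===== CLAIM (what is proved, stated in full; the proofs are below) =====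
def Claim_equal_encode_paper : Prop := ∀ (content : List (List (String × String))), Dom_encode_paper content → Pre_encode_paper content → Spec_encode_paper content (encode_paper content)

-- ===== LEMMAS AND PROOFS =====
-- invariant: A's loop from running total wl produces exactly the prefix B selects from cumulative sums started at wl
lemma encodeGoA_eq_prefix (l : List (List (String × String))) :
    ∀ (sections : List String) (wl : Int),
      encodeGoA l sections wl =
        sections ++ (l.map (fun cont => ((PySem.Dict.mk cont).get? "text").getD "")).take
          (prefixLenB (cumB ((l.map (fun cont => ((PySem.Dict.mk cont).get? "text").getD "")).map
            (fun t => ((PySem.Str.split₀ t).length : Int))) wl)) := by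
  induction l with
  | nil => intro s wl; simp [encodeGoA, cumB, prefixLenB]
  | cons cont rest ih =>
      intro s wl
      simp only [encodeGoA, List.map_cons, cumB, prefixLenB]
      set t := ((PySem.Dict.mk cont).get? "text").getD "" with ht
      set n : Int := ((PySem.Str.split₀ t).length : Int) with hn
      by_cases h : wl + n > 2500
      · rw [if_pos h, if_neg (by omega)]
        simp
      · rw [if_neg h, if_pos (by omega), ih]
        simp

-- ===== VERDICT (by name: the statement is the Claim_ definition above) =====
theorem encode_paper_spec : Claim_equal_encode_paper := by
  intro content _ _
  unfold Spec_encode_paper encode_paper encode_paper_alt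
  rw [encodeGoA_eq_prefix]
  simp
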